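-- pv_equiv track=rewrite | github.com/Apllin/song_digger | python-service/app/api/routes/suggestions.py | _rerank_by_coverage
-- ===== SOURCE A (Python) =====
-- def _rerank_by_coverage(items: list[str], query: str) -> list[str]:
--     """
--     For multi-word queries re-rank suggestions by how many query words appear
--     in each suggestion. Suggestions that contain more of the query words rank
--     higher. Equal-coverage items keep their original relative order (stable sort).
--
--     Example: query "Headphones Sascha Funke"
--       "Sascha Funke, Nina Kraviz - Headphones"  → 3/3 words  → rank 1
--       "Sascha Funke"                             → 2/3 words  → rank 2
--       "Cornelia Funke"                           → 1/3 words  → rank 6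
--     """
--     words = [w.lower() for w in query.split() if len(w) > 1]
--     if len(words) < 2:
--         return items  # single-word query — ordering is already correct
--
--     def coverage(s: str) -> int:
--         s_lower = s.lower()
--         return sum(1 for w in words if w in s_lower)
--
--     return sorted(items, key=coverage, reverse=True)
-- ===== SOURCE B (Python) =====
-- def _rerank_by_coverage(items: list[str], query: str) -> list[str]:
--     # Bucket by coverage score instead of sorting: precompute each item's score
--     # once, then concatenate the equal-score groups from highest score down.
--     words = [w.lower() for w in query.split() if len(w) > 1]
--     if len(words) < 2:
--         return items
--
--     def coverage(s: str) -> int: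
--         s_lower = s.lower()
--         return len([w for w in words if w in s_lower])
--
--     pairs = [(coverage(s), s) for s in items]
--     result = []
--     for score in reversed(range(len(words) + 1)):
--         result.extend(s for c, s in pairs if c == score)
--     return result
-- ===== Notes on version B (the rewrite author's own statement) =====
-- stated objective: alternative
-- what changed: Replaces the key-based stable descending sort by score bucketing: each item's coverage score is computed once, and the result is the concatenation of the equal-score groups from the highest possible score down to 0, with no comparison sort.
import Mathlib
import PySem

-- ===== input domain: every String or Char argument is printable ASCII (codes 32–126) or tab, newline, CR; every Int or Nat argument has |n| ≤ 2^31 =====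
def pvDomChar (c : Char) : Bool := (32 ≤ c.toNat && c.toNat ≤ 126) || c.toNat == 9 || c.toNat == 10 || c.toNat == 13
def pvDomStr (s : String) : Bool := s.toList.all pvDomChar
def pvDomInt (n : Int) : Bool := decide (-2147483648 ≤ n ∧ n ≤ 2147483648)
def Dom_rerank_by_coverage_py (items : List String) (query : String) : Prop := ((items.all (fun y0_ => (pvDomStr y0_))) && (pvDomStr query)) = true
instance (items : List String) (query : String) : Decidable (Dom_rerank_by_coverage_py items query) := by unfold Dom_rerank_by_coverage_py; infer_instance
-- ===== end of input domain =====

-- ===== PORT A =====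
-- B changes only the re-ranking strategy (bucketing by score instead of a key sort); same return value.
def pyCoverage (words : List String) (s : String) : Int :=
  let s_lower := PySem.Str.lower s
  words.foldl (fun acc w => if PySem.Str.isIn w s_lower then acc + 1 else acc) 0

def rerank_by_coverage_py (items : List String) (query : String) : List String :=
  let words := ((PySem.Str.split₀ query).filter (fun w => decide (1 < PySem.Str.len w))).map (fun w => PySem.Str.lower w)
  if (words.length : Int) < 2 then items
  else PySem.List.sorted items (fun s => pyCoverage words s) true

-- ===== PORT B =====
def altCoverage (words : List String) (s : String) : Int :=
  let s_lower := PySem.Str.lower s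
  ((words.filter (fun w => PySem.Str.isIn w s_lower)).length : Int)

def rerank_by_coverage_py_alt (items : List String) (query : String) : List String :=
  let words := ((PySem.Str.split₀ query).filter (fun w => decide (1 < PySem.Str.len w))).map (fun w => PySem.Str.lower w)
  if (words.length : Int) < 2 then items
  else
    let pairs := items.map (fun s => (altCoverage words s, s))
    ((PySem.List.pyRange 0 ((words.length : Int) + 1) 1).reverse).foldl
      (fun result k => result ++ (pairs.filter (fun p => p.1 == k)).map (fun p => p.2)) []

-- ===== PRECONDITION & SPEC =====
def Spec_rerank_by_coverage_py (items : List String) (query : String) (out : List String) : Prop := out = rerank_by_coverage_py_alt items query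
instance (items : List String) (query : String) (out : List String) : Decidable (Spec_rerank_by_coverage_py items query out) := by unfold Spec_rerank_by_coverage_py; infer_instance

-- ===== CLAIM (what is proved, stated in full; the proofs are below) =====
def Claim_equal_rerank_by_coverage_py : Prop := ∀ (items : List String) (query : String), Dom_rerank_by_coverage_py items query → Spec_rerank_by_coverage_py items query (rerank_by_coverage_py items query)

-- ===== LEMMAS AND PROOFS =====

theorem insertBy_cons {α : Type} (before : α → α → Bool) (x y : α) (ys : List α) :
    PySem.List.insertBy before x (y :: ys) =
      if before x y then x :: y :: ys else y :: PySem.List.insertBy before x ys := rfl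

theorem insertBy_front {α : Type} (before : α → α → Bool) (x : α) (ys : List α)
    (h : ∀ y ∈ ys, before x y = true) : PySem.List.insertBy before x ys = x :: ys := by
  cases ys with
  | nil => rfl
  | cons y t => rw [insertBy_cons, h y (by simp)]; simp

theorem insertBy_skip {α : Type} (before : α → α → Bool) (x : α) (as bs : List α)
    (h : ∀ a ∈ as, before x a = false) :
    PySem.List.insertBy before x (as ++ bs) = as ++ PySem.List.insertBy before x bs := by
  induction as with
  | nil => rfl
  | cons a t ih =>
      have ha : before x a = false := h a (by simp)
      simp only [List.cons_append, insertBy_cons, ha, Bool.false_eq_true, if_false]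
      rw [ih (fun a ha => h a (by simp [ha]))]

theorem pyRange_self (a : Int) : PySem.List.pyRange a a 1 = [] := by
  simp [PySem.List.pyRange]

theorem pyRange_single (a : Int) : PySem.List.pyRange a (a + 1) 1 = [a] := by
  rw [PySem.List.pyRange_one_cons (by omega), pyRange_self]

theorem pyRange_rev_succ (n : Nat) :
    (PySem.List.pyRange 0 ((n : Int) + 1) 1).reverse =
      (n : Int) :: (PySem.List.pyRange 0 (n : Int) 1).reverse := by
  rw [PySem.List.pyRange_one_append 0 (n : Int) ((n : Int) + 1) (Int.natCast_nonneg n) (by omega),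
    pyRange_single]
  simp

theorem mem_pyRange_nat (n : Nat) (k : Int) :
    k ∈ PySem.List.pyRange 0 (n : Int) 1 ↔ 0 ≤ k ∧ k < (n : Int) := by
  induction n with
  | zero =>
      rw [Nat.cast_zero, pyRange_self]
      simp only [List.not_mem_nil, false_iff]
      omega
  | succ m ih =>
      have h2 : PySem.List.pyRange 0 ((m : Int) + 1) 1
          = ((m : Int) :: (PySem.List.pyRange 0 (m : Int) 1).reverse).reverse := by
        rw [← pyRange_rev_succ]; simp
      push_cast
      rw [h2]
      simp only [List.mem_reverse, List.mem_cons, List.mem_reverse]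
      rw [ih]
      omega

theorem pairwise_desc_rev (n : Nat) :
    ((PySem.List.pyRange 0 (n : Int) 1).reverse).Pairwise (fun a b => b < a) := by
  induction n with
  | zero => rw [Nat.cast_zero, pyRange_self]; simp
  | succ m ih =>
      push_cast
      rw [pyRange_rev_succ m]
      refine List.pairwise_cons.mpr ⟨?_, ih⟩
      intro k hk
      rw [List.mem_reverse] at hk
      have := (mem_pyRange_nat m k).1 hk
      omega

-- buckets: concatenation of the equal-score groups along the score list ks
def pvBuckets (c : String → Int) (ks : List Int) (xs : List String) : List String :=
  (ks.map (fun k => xs.filter (fun s => c s == k))).flatten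

theorem pvBuckets_nil (c : String → Int) (ks : List Int) : pvBuckets c ks [] = [] := by
  induction ks with
  | nil => rfl
  | cons k t ih => simp [pvBuckets]

theorem pvBuckets_append_notmem (c : String → Int) (ks : List Int) (xs : List String) (x : String)
    (hx : c x ∉ ks) : pvBuckets c ks (xs ++ [x]) = pvBuckets c ks xs := by
  induction ks with
  | nil => rfl
  | cons k t ih =>
      have hk : ¬ (c x == k) = true := by
        simp only [beq_iff_eq]; intro h; exact hx (by simp [h])
      simp only [pvBuckets, List.map_cons, List.flatten_cons, List.filter_append] at *
      rw [ih (fun h => hx (by simp [h]))]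
      simp [List.filter, hk]

theorem insert_pvBuckets (c : String → Int) (x : String) (ks : List Int) (xs : List String)
    (hdesc : ks.Pairwise (fun a b => b < a)) (hmem : c x ∈ ks) :
    PySem.List.insertBy (fun a b => decide (c b < c a)) x (pvBuckets c ks xs) =
      pvBuckets c ks (xs ++ [x]) := by
  induction ks with
  | nil => simp at hmem
  | cons k t ih =>
      have hdt := (List.pairwise_cons.mp hdesc).2
      have hlt := (List.pairwise_cons.mp hdesc).1
      by_cases hx : c x = k
      · -- x belongs to the first bucket: skip it, then land at the front of the rest
        have hskip : ∀ a ∈ xs.filter (fun s => c s == k), (decide (c a < c x)) = false := by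
          intro a ha
          have : c a = k := by simpa using (List.mem_filter.mp ha).2
          simp [this, hx]
        have hfront : ∀ y ∈ pvBuckets c t xs, (decide (c y < c x)) = true := by
          intro y hy
          simp only [pvBuckets, List.mem_flatten, List.mem_map] at hy
          obtain ⟨l, ⟨k', hk', rfl⟩, hyl⟩ := hy
          have : c y = k' := by simpa using (List.mem_filter.mp hyl).2
          have := hlt k' hk'
          simp_all
        have hxt : c x ∉ t := by
          intro h; have := hlt _ h; omega
        simp only [pvBuckets, List.map_cons, List.flatten_cons]
        rw [insertBy_skip _ _ _ _ hskip, insertBy_front _ _ _ hfront]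
        have := pvBuckets_append_notmem c t xs x hxt
        simp only [pvBuckets] at this
        rw [this]
        simp [List.filter_append, hx]
      · have hmt : c x ∈ t := by simpa [hx] using hmem
        have hkgt : k > c x := by
          have := hlt _ hmt; omega
        have hskip : ∀ a ∈ xs.filter (fun s => c s == k), (decide (c a < c x)) = false := by
          intro a ha
          have : c a = k := by simpa using (List.mem_filter.mp ha).2
          simp [this]; omega
        simp only [pvBuckets, List.map_cons, List.flatten_cons]
        rw [insertBy_skip _ _ _ _ hskip]
        have := ih hdt hmt
        simp only [pvBuckets] at this
        rw [this]
        simp [List.filter_append, hx]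

theorem sorted_eq_pvBuckets (c : String → Int) (ks : List Int) (xs : List String)
    (hdesc : ks.Pairwise (fun a b => b < a)) (hmem : ∀ x, c x ∈ ks) :
    PySem.List.sorted xs c true = pvBuckets c ks xs := by
  rw [PySem.List.sorted_rev_eq_foldl_insertBy]
  induction xs using List.reverseRecOn with
  | nil => simp [pvBuckets_nil]
  | append_singleton xs x ih =>
      rw [List.foldl_append, List.foldl_cons, List.foldl_nil, ih]
      exact insert_pvBuckets c x ks xs hdesc (hmem x)

theorem foldl_append_flatten {α β : Type} (f : α → List β) (ks : List α) (init : List β) :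
    ks.foldl (fun r k => r ++ f k) init = init ++ (ks.map f).flatten := by
  induction ks generalizing init with
  | nil => simp
  | cons k t ih => simp [List.foldl_cons, ih]

theorem filter_map_pairs (c : String → Int) (xs : List String) (k : Int) :
    ((xs.map (fun s => (c s, s))).filter (fun p => p.1 == k)).map (fun p => p.2) =
      xs.filter (fun s => c s == k) := by
  induction xs with
  | nil => rfl
  | cons y t ih =>
      by_cases h : c y = k <;> simp [h, ih]

theorem coverage_eq (words : List String) (s : String) :
    pyCoverage words s = altCoverage words s := by
  simp [pyCoverage, altCoverage, PySem.List.foldl_if_add_one, List.countP_eq_length_filter]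

theorem altCoverage_mem (words : List String) (s : String) :
    altCoverage words s ∈ (PySem.List.pyRange 0 ((words.length : Int) + 1) 1).reverse := by
  rw [List.mem_reverse]
  have : ((words.length : Int) + 1) = (((words.length + 1 : Nat)) : Int) := by push_cast; ring
  rw [this, mem_pyRange_nat]
  have hle : (words.filter (fun w => PySem.Str.isIn w (PySem.Str.lower s))).length ≤ words.length :=
    List.length_filter_le _ _
  constructor
  · simp [altCoverage]
  · simp only [altCoverage]
    push_cast
    omega

-- ===== VERDICT (by name: the statement is the Claim_ definition above) =====
theorem rerank_by_coverage_py_spec : Claim_equal_rerank_by_coverage_py := by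
  intro items query _
  unfold Spec_rerank_by_coverage_py rerank_by_coverage_py rerank_by_coverage_py_alt
  set words := ((PySem.Str.split₀ query).filter (fun w => decide (1 < PySem.Str.len w))).map (fun w => PySem.Str.lower w) with hw
  by_cases h2 : (words.length : Int) < 2
  · simp [h2]
  · simp only [h2, if_false]
    have hkey : (fun s => pyCoverage words s) = (fun s => altCoverage words s) := by
      funext s; exact coverage_eq words s
    rw [hkey, foldl_append_flatten]
    rw [sorted_eq_pvBuckets (fun s => altCoverage words s)
          ((PySem.List.pyRange 0 ((words.length : Int) + 1) 1).reverse) items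
          ?_ (fun x => altCoverage_mem words x)]
    · simp only [pvBuckets, List.nil_append]
      refine congrArg List.flatten (List.map_congr_left ?_)
      intro k _
      exact (filter_map_pairs (fun s => altCoverage words s) items k).symm
    · have : ((words.length : Int) + 1) = (((words.length + 1 : Nat)) : Int) := by push_cast; ring
      rw [this]
      exact pairwise_desc_rev (words.length + 1)
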